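-- pv_equiv track=rewrite | github.com/TheGammaSqueeze/GammaOSDistribution | tools/security/gdb/parameters_extract.py | parse_function_arguments
-- ===== SOURCE A (Python) =====
-- def parse_function_arguments(func_info):
--     """
--     Parses the output of 'whatis' command into a list of arguments
--     "void (teststruct)" --> ["teststruct"]
--     "int (int (*)(int, char **, char **), int, char **, int (*)(int, char **, char **),
--     void (*)(void), void (*)(void), void *)" --> ['int (*)(int, char **, char **)',
--     'int', 'char **', 'int (*)(int, char **, char **)', 'void (*)(void)',
--     'void (*)(void)', ' void *']
--
--     Args:
--         func_info: (string) output of gdb's 'whatis' command for a function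
--     Returns:
--         parsed_params: (list) parsed parameters of the function
--     """
--     if '(' not in func_info:
--         return []
--     func_params = func_info[func_info.index('(')+1:-1]
--     parentheses_count = 0
--     current_param = ""
--     parsed_params = []
--
--     for token in func_params:
--         # Essentially trying to get the data types from a function declaration
--         if token == '(':
--             parentheses_count += 1
--         elif token == ')':
--             parentheses_count -= 1
--
--         # If we are not inside any paren and see a ',' it signals the start of
--         #the next parameter
--         if token == ',' and parentheses_count == 0:
--             parsed_params.append(current_param.strip())
--             current_param = ""
--         else:
--             current_param += token
--
--     parsed_params.append(current_param)
--     return parsed_params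
-- ===== SOURCE B (Python) =====
-- def parse_function_arguments(func_info):
--     if '(' not in func_info:
--         return []
--     func_params = func_info[func_info.index('(')+1:-1]
--     # pass 1: record positions of every comma at parenthesis depth 0
--     depth = 0
--     cuts = []
--     for i, ch in enumerate(func_params):
--         if ch == '(':
--             depth += 1
--         elif ch == ')':
--             depth -= 1
--         elif ch == ',' and depth == 0:
--             cuts.append(i)
--     # pass 2: slice between boundaries; every segment stripped except the last
--     parsed_params = []
--     start = 0
--     for c in cuts:
--         parsed_params.append(func_params[start:c].strip())
--         start = c + 1
--     parsed_params.append(func_params[start:])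
--     return parsed_params
-- ===== Notes on version B (the rewrite author's own statement) =====
-- stated objective: alternative
-- what changed: Replaces the single character-by-character fold that accumulates the current parameter string with a two-pass index scheme: one pass records the positions of depth-0 commas, a second pass slices the string between consecutive boundaries (stripping all but the final segment).
import Mathlib
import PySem

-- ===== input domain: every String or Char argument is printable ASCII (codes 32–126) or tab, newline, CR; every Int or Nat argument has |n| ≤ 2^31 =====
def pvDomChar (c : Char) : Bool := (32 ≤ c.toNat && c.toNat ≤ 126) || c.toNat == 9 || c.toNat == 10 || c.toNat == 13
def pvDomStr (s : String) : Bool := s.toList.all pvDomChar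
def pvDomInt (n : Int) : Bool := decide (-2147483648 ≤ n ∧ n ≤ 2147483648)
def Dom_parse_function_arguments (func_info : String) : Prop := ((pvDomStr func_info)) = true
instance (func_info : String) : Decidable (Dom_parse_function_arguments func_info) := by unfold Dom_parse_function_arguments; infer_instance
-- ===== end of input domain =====

-- B replaces A's one-pass accumulator fold by a two-pass scheme (record depth-0 comma
-- positions, then slice between boundaries); 'alternative' objective, same cost.

-- ===== PORT A =====
-- Python A's loop body: update parentheses_count, then either cut (strip & flush) or extend current_param.
def pvStepA (st : Int × List Char × List (List Char)) (token : Char) :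
    Int × List Char × List (List Char) :=
  let d := if token = '(' then st.1 + 1 else if token = ')' then st.1 - 1 else st.1
  if token = ',' ∧ d = 0 then (d, [], st.2.2 ++ [PySem.Chars.strip st.2.1])
  else (d, st.2.1 ++ [token], st.2.2)

def parse_function_arguments (func_info : String) : List String :=
  let cs := func_info.toList
  if PySem.Chars.isIn ['('] cs = false then []
  else
    let func_params := PySem.List.slice cs (some (PySem.Chars.find cs ['('] + 1)) (some (-1))
    let st := func_params.foldl pvStepA (0, ([] : List Char), ([] : List (List Char)))
    (st.2.2 ++ [st.2.1]).map (fun l => String.ofList l)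

-- ===== PORT B =====
-- pass 1 body: track depth, append the index of each depth-0 comma
def pvStepB (st : Int × List Int) (p : Int × Char) : Int × List Int :=
  if p.2 = '(' then (st.1 + 1, st.2)
  else if p.2 = ')' then (st.1 - 1, st.2)
  else if p.2 = ',' ∧ st.1 = 0 then (st.1, st.2 ++ [p.1])
  else st

-- pass 2: slice between consecutive boundaries; final segment unstripped
def pvBuildB (S : List Char) (start : Int) : List Int → List (List Char)
  | [] => [PySem.List.slice S (some start) none]
  | c :: rest => PySem.Chars.strip (PySem.List.slice S (some start) (some c)) :: pvBuildB S (c + 1) rest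

def parse_function_arguments_alt (func_info : String) : List String :=
  let cs := func_info.toList
  if PySem.Chars.isIn ['('] cs then
    let s := PySem.List.slice cs (some (PySem.Chars.find cs ['('] + 1)) (some (-1))
    let cuts := ((PySem.List.enumerate s 0).foldl pvStepB (0, ([] : List Int))).2
    (pvBuildB s 0 cuts).map (fun l => String.ofList l)
  else []

-- ===== PRECONDITION & SPEC =====
def Spec_parse_function_arguments (func_info : String) (out : List String) : Prop := out = parse_function_arguments_alt func_info
instance (func_info : String) (out : List String) : Decidable (Spec_parse_function_arguments func_info out) := by unfold Spec_parse_function_arguments; infer_instance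

-- ===== CLAIM (what is proved, stated in full; the proofs are below) =====
def Claim_equal_parse_function_arguments : Prop := ∀ (func_info : String), Dom_parse_function_arguments func_info → Spec_parse_function_arguments func_info (parse_function_arguments func_info)

-- ===== LEMMAS AND PROOFS =====

-- common specification: split at depth-0 commas, stripping all but the final segment
def pvSplit (d : Int) (cur : List Char) : List Char → List (List Char)
  | [] => [cur]
  | c :: r =>
    let d' := if c = '(' then d + 1 else if c = ')' then d - 1 else d
    if c = ',' ∧ d' = 0 then PySem.Chars.strip cur :: pvSplit d' [] r
    else pvSplit d' (cur ++ [c]) r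

lemma pvStepA_split (s : List Char) : ∀ (d : Int) (cur : List Char) (parsed : List (List Char)),
    (s.foldl pvStepA (d, cur, parsed)).2.2 ++ [(s.foldl pvStepA (d, cur, parsed)).2.1]
      = parsed ++ pvSplit d cur s := by
  induction s with
  | nil => intro d cur parsed; simp [pvSplit]
  | cons c r ih =>
    intro d cur parsed
    simp only [List.foldl_cons, pvSplit]
    by_cases h : c = ',' ∧ (if c = '(' then d + 1 else if c = ')' then d - 1 else d) = 0
    · obtain ⟨hc, hd⟩ := h
      subst hc
      rw [if_neg (by decide), if_neg (by decide)] at hd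
      subst hd
      simp [pvStepA, ih]
    · simp [pvStepA, h, ih]

-- the recursive form of pass 1's fold
def pvCuts (d : Int) : List (Int × Char) → List Int
  | [] => []
  | (i, c) :: r =>
    if c = '(' then pvCuts (d + 1) r
    else if c = ')' then pvCuts (d - 1) r
    else if c = ',' ∧ d = 0 then i :: pvCuts d r
    else pvCuts d r

lemma pvStepB_cuts (e : List (Int × Char)) : ∀ (d : Int) (acc : List Int),
    (e.foldl pvStepB (d, acc)).2 = acc ++ pvCuts d e := by
  induction e with
  | nil => intro d acc; simp [pvCuts]
  | cons p r ih =>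
    intro d acc
    obtain ⟨i, c⟩ := p
    simp only [List.foldl_cons, pvCuts]
    by_cases h1 : c = '('
    · simp [pvStepB, h1, ih]
    · by_cases h2 : c = ')'
      · simp [pvStepB, h2, ih]
      · by_cases h3 : c = ',' ∧ d = 0
        · simp [pvStepB, h3, ih]
        · simp [pvStepB, h1, h2, h3, ih]

lemma pvBuild_split (t : List Char) : ∀ (P Q : List Char) (d : Int),
    pvBuildB (Q ++ P ++ t) (Q.length : Int)
        (pvCuts d (PySem.List.enumerate t ((Q.length : Int) + (P.length : Int))))
      = pvSplit d P t := by
  induction t with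
  | nil =>
    intro P Q d
    simp [pvBuildB, pvSplit, PySem.List.enumerate, pvCuts,
      PySem.List.slice_from_natCast]
  | cons c r ih =>
    intro P Q d
    rw [PySem.List.enumerate_cons]
    by_cases h1 : c = '('
    · subst h1
      have key := ih (P ++ ['(']) Q (d + 1)
      rw [show Q ++ (P ++ ['(']) ++ r = Q ++ P ++ '(' :: r by simp,
          show (Q.length : Int) + (((P ++ ['(']).length : Nat) : Int)
             = (Q.length : Int) + (P.length : Int) + 1 by push_cast [List.length_append, List.length_cons, List.length_nil]; ring] at key
      simpa [pvCuts, pvSplit] using key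
    · by_cases h2 : c = ')'
      · subst h2
        have key := ih (P ++ [')']) Q (d - 1)
        rw [show Q ++ (P ++ [')']) ++ r = Q ++ P ++ ')' :: r by simp,
            show (Q.length : Int) + (((P ++ [')']).length : Nat) : Int)
               = (Q.length : Int) + (P.length : Int) + 1 by push_cast [List.length_append, List.length_cons, List.length_nil]; ring] at key
        simpa [pvCuts, pvSplit] using key
      · by_cases h3 : c = ',' ∧ d = 0
        · obtain ⟨hc, hd⟩ := h3
          subst hc; subst hd
          have hsl : PySem.List.slice (Q ++ P ++ ',' :: r) (some (Q.length : Int))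
              (some ((Q.length : Int) + (P.length : Int))) = P := by
            rw [show (Q.length : Int) + (P.length : Int)
                  = ((Q.length + P.length : Nat) : Int) by push_cast; ring,
                PySem.List.slice_natCast]
            simp
          have key := ih [] (Q ++ P ++ [',']) 0
          rw [show Q ++ P ++ [','] ++ ([] : List Char) ++ r = Q ++ P ++ ',' :: r by simp,
              show ((Q ++ P ++ [',']).length : Int) + (([] : List Char).length : Int)
                 = (Q.length : Int) + (P.length : Int) + 1 by push_cast [List.length_append, List.length_cons, List.length_nil]; ring,
              show ((Q ++ P ++ [',']).length : Int)
                 = (Q.length : Int) + (P.length : Int) + 1 by push_cast [List.length_append, List.length_cons, List.length_nil]; ring] at key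
          simp only [pvCuts, pvSplit, pvBuildB, Char.reduceEq, if_false, and_true, if_pos]
          rw [hsl, key]
        · have key := ih (P ++ [c]) Q d
          rw [show Q ++ (P ++ [c]) ++ r = Q ++ P ++ c :: r by simp,
              show (Q.length : Int) + (((P ++ [c]).length : Nat) : Int)
                 = (Q.length : Int) + (P.length : Int) + 1 by push_cast [List.length_append, List.length_cons, List.length_nil]; ring] at key
          simpa [pvCuts, pvSplit, h1, h2, h3] using key

-- ===== VERDICT (by name: the statement is the Claim_ definition above) =====
theorem parse_function_arguments_spec : Claim_equal_parse_function_arguments := by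
  intro func_info _
  unfold Spec_parse_function_arguments parse_function_arguments parse_function_arguments_alt
  by_cases h : PySem.Chars.isIn ['('] func_info.toList
  · simp only [h, Bool.true_eq_false, reduceIte]
    congr 1
    rw [pvStepA_split, pvStepB_cuts]
    have := pvBuild_split
      (PySem.List.slice func_info.toList (some (PySem.Chars.find func_info.toList ['('] + 1)) (some (-1)))
      [] [] 0
    simpa using this.symm
  · simp [h]
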